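-- pv_equiv track=rewrite | github.com/svend4/meta | projects/hexglyph/solan_lyapunov.py | perturbation_cone
-- ===== SOURCE A (Python) =====
-- def _mode_step(cells: list[int], rule: str) -> list[int]:
--     N   = len(cells)
--     out = []
--     for i in range(N):
--         l, c, r = cells[(i - 1) % N], cells[i], cells[(i + 1) % N]
--         if   rule == 'xor':  out.append((l ^ r)       & 63)
--         elif rule == 'xor3': out.append((l ^ c ^ r)   & 63)
--         elif rule == 'and':  out.append((l & r)        & 63)
--         else:                out.append((l | r)        & 63)
--     return out
--
-- def perturbation_cone(ic: list[int], j: int, rule: str,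
--                       T: int = 16) -> list[list[int]]:
--     """T × N binary matrix: cone[t][i] = 1 if cell i affected at step t.
--     Averaged over all 6 bit flips of cell j."""
--     N  = len(ic)
--     T_ = min(T, 16)
--     agg = [[0.0] * N for _ in range(T_)]
--     for bit in range(6):
--         ic2 = ic[:]
--         ic2[j] ^= (1 << bit)
--         cur, cur2 = ic[:], ic2[:]
--         for t in range(T_):
--             for i in range(N):
--                 agg[t][i] += 1.0 if cur[i] != cur2[i] else 0.0
--             cur  = _mode_step(cur,  rule)
--             cur2 = _mode_step(cur2, rule)
--     return [[round(v / 6) for v in row] for row in agg]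
-- ===== SOURCE B (Python) =====
-- def _step(cells, rule):
--     left = cells[-1:] + cells[:-1]
--     right = cells[1:] + cells[:1]
--     if rule == 'xor':
--         return [(l ^ r) & 63 for l, r in zip(left, right)]
--     if rule == 'xor3':
--         return [(l ^ c ^ r) & 63 for l, c, r in zip(left, cells, right)]
--     if rule == 'and':
--         return [(l & r) & 63 for l, r in zip(left, right)]
--     return [(l | r) & 63 for l, r in zip(left, right)]
--
-- def _popcount6(x):
--     return sum((x >> b) & 1 for b in range(6))
--
-- def perturbation_cone(ic, j, rule, T=16):
--     # All rules are bitwise, so the 6 bit planes evolve independently and the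
--     # single state with all 6 bits of cell j flipped carries, in plane b, the
--     # evolution of the bit-b flip; agg[t][i] is then popcount((cur^cur2)&63).
--     T_ = min(T, 16)
--     cur = ic[:]
--     cur2 = ic[:]
--     cur2[j] ^= 63
--     cone = []
--     for _ in range(T_):
--         cone.append([1 if _popcount6((a ^ b) & 63) >= 4 else 0
--                      for a, b in zip(cur, cur2)])
--         cur = _step(cur, rule)
--         cur2 = _step(cur2, rule)
--     return cone
-- ===== Notes on version B (the rewrite author's own statement) =====
-- stated objective: faster
-- what changed: B exploits that all four rules are bitwise, so the six bit planes evolve independently: it evolves a SINGLE perturbed state with all six bits of cell j flipped (instead of A's six separate perturbed runs each paired with a re-evolved reference) and reads each cone entry as a popcount of (cur^cur2)&63 thresholded at 4.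
import Mathlib
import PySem

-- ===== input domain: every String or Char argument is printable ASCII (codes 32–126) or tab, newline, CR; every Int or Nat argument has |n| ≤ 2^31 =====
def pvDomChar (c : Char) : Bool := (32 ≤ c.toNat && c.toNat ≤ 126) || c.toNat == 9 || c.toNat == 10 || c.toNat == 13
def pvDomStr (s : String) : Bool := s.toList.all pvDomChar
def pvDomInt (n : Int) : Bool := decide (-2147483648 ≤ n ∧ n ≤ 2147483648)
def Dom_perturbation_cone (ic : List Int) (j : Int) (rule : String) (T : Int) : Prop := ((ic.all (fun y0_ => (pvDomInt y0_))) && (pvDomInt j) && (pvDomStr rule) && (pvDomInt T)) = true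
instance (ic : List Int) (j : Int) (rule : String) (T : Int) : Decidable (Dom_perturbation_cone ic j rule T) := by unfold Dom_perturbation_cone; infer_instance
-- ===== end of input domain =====

-- All four rules are bitwise, so the six bit planes of a state evolve independently: B evolves
-- ONE perturbed state (all six bits of cell j flipped) instead of A's six perturbed runs each
-- paired with a re-evolved reference, and reads each entry off a popcount (objective: faster).

-- ===== PORT A =====
-- round(v/6) on the float count v ∈ {0.0,…,6.0}: exact, since 3/6 = 0.5 rounds to 0
-- (banker's rounding) and every other sixth rounds to 1 exactly from 4/6 up.
def roundSixth (v : Int) : Int := if 4 ≤ v then 1 else 0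

def modeStep (cells : List Int) (rule : String) : List Int :=
  let N : Int := (cells.length : Int)
  (PySem.List.pyRange 0 N 1).foldl (fun out i =>
    let l := PySem.List.pyGetD cells (PySem.Int.mod (i - 1) N) 0
    let c := PySem.List.pyGetD cells i 0
    let r := PySem.List.pyGetD cells (PySem.Int.mod (i + 1) N) 0
    out ++ [if rule = "xor" then PySem.Int.band (PySem.Int.bxor l r) 63
            else if rule = "xor3" then PySem.Int.band (PySem.Int.bxor (PySem.Int.bxor l c) r) 63
            else if rule = "and" then PySem.Int.band (PySem.Int.band l r) 63
            else PySem.Int.band (PySem.Int.bor l r) 63]) []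

-- all list indexing in the Python is in range under Pre_, so pyGetD/pySetD are exact here
def perturbation_cone (ic : List Int) (j : Int) (rule : String) (T : Int) : List (List Int) :=
  let N : Int := (ic.length : Int)
  let T_ : Int := min T 16
  let agg0 : List (List Int) := (PySem.List.pyRange 0 T_ 1).map (fun _ => List.replicate ic.length (0 : Int))
  let agg :=
    (PySem.List.pyRange 0 6 1).foldl (fun agg bit =>
      let ic2 := PySem.List.pySetD ic j (PySem.Int.bxor (PySem.List.pyGetD ic j 0) ((1 : Int) <<< bit.toNat))
      ((PySem.List.pyRange 0 T_ 1).foldl (fun (st : List (List Int) × List Int × List Int) t =>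
        let row := (PySem.List.pyRange 0 N 1).foldl (fun row i =>
            PySem.List.pySetD row i (PySem.List.pyGetD row i 0 +
              (if PySem.List.pyGetD st.2.1 i 0 ≠ PySem.List.pyGetD st.2.2 i 0 then (1:Int) else 0)))
          (PySem.List.pyGetD st.1 t [])
        (PySem.List.pySetD st.1 t row, modeStep st.2.1 rule, modeStep st.2.2 rule)) (agg, ic, ic2)).1) agg0
  agg.map (fun row => row.map (fun v => roundSixth v))

-- ===== PORT B =====
def stepB (cells : List Int) (rule : String) : List Int :=
  let left := PySem.List.slice cells (some (-1)) none ++ PySem.List.slice cells none (some (-1))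
  let right := PySem.List.slice cells (some 1) none ++ PySem.List.slice cells none (some 1)
  if rule = "xor" then (left.zip right).map (fun p => PySem.Int.band (PySem.Int.bxor p.1 p.2) 63)
  else if rule = "xor3" then
    (left.zip (cells.zip right)).map (fun p => PySem.Int.band (PySem.Int.bxor (PySem.Int.bxor p.1 p.2.1) p.2.2) 63)
  else if rule = "and" then (left.zip right).map (fun p => PySem.Int.band (PySem.Int.band p.1 p.2) 63)
  else (left.zip right).map (fun p => PySem.Int.band (PySem.Int.bor p.1 p.2) 63)

-- Python's `x >> b` is Lean's shift by a Nat count (PYSEM: n >> k is 'n >>> k', k : Nat)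
def shiftR (x : Int) (k : Nat) : Int := x >>> k

def popcount6 (x : Int) : Int :=
  ((PySem.List.pyRange 0 6 1).map (fun b => PySem.Int.band (shiftR x b.toNat) 1)).sum

def perturbation_cone_alt (ic : List Int) (j : Int) (rule : String) (T : Int) : List (List Int) :=
  let T_ : Int := min T 16
  let cur := ic
  let cur2 := PySem.List.pySetD ic j (PySem.Int.bxor (PySem.List.pyGetD ic j 0) 63)
  ((PySem.List.pyRange 0 T_ 1).foldl
    (fun (st : List (List Int) × List Int × List Int) _ =>
      (st.1 ++ [(st.2.1.zip st.2.2).map (fun p =>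
          if 4 ≤ popcount6 (PySem.Int.band (PySem.Int.bxor p.1 p.2) 63) then (1:Int) else 0)],
       stepB st.2.1 rule, stepB st.2.2 rule))
    (([] : List (List Int)), cur, cur2)).1

-- ===== PRECONDITION & SPEC =====
-- Pre_ excludes exactly the inputs where Python A raises IndexError on `ic2[j] ^= …`
-- (j outside [-len(ic), len(ic)), in particular any j on an empty ic).
def Pre_perturbation_cone (ic : List Int) (j : Int) (rule : String) (T : Int) : Prop :=
  PySem.Raise.InRange ic.length j

instance (ic : List Int) (j : Int) (rule : String) (T : Int) : Decidable (Pre_perturbation_cone ic j rule T) := by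
  unfold Pre_perturbation_cone; infer_instance

def pvWitness_perturbation_cone : List Int × Int × String × Int := ([1, 2, 3], 0, "xor", 3)

def Spec_perturbation_cone (ic : List Int) (j : Int) (rule : String) (T : Int) (out : List (List Int)) : Prop := out = perturbation_cone_alt ic j rule T
instance (ic : List Int) (j : Int) (rule : String) (T : Int) (out : List (List Int)) : Decidable (Spec_perturbation_cone ic j rule T out) := by unfold Spec_perturbation_cone; infer_instance

-- ===== CLAIM (what is proved, stated in full; the proofs are below) =====
def Claim_equal_perturbation_cone : Prop := ∀ (ic : List Int) (j : Int) (rule : String) (T : Int), Dom_perturbation_cone ic j rule T → Pre_perturbation_cone ic j rule T → Spec_perturbation_cone ic j rule T (perturbation_cone ic j rule T)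

-- ===== LEMMAS AND PROOFS =====

theorem pyRange_cast (T : Int) :
    PySem.List.pyRange 0 T 1 = @List.map Nat Int (fun k => (k:Int)) (List.range T.toNat) := by
  unfold PySem.List.pyRange
  by_cases h : 0 < T
  · simp only [if_neg (by norm_num : ¬ (1:Int) = 0), if_pos (by norm_num : (0:Int) < 1), if_pos h]
    have e : ((T - 0 + 1 - 1) / 1 : Int).toNat = T.toNat := by omega
    rw [e]; simp
  · simp only [if_neg (by norm_num : ¬ (1:Int) = 0), if_pos (by norm_num : (0:Int) < 1), if_neg h]
    have e : T.toNat = 0 := by omega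
    simp [e]

theorem list_eq_map_getD {α : Type} (l : List α) (dflt : α) :
    (List.range l.length).map (fun t => l.getD t dflt) = l := by
  apply List.ext_getElem
  · simp
  · intro i h1 h2
    simp only [List.getElem_map, List.getElem_range]
    exact List.getD_eq_getElem l dflt h2

def applyRule (rule : String) (l c r : Int) : Int :=
  if rule = "xor" then PySem.Int.band (PySem.Int.bxor l r) 63
  else if rule = "xor3" then PySem.Int.band (PySem.Int.bxor (PySem.Int.bxor l c) r) 63
  else if rule = "and" then PySem.Int.band (PySem.Int.band l r) 63
  else PySem.Int.band (PySem.Int.bor l r) 63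

-- the common per-cell value of the two step functions
def cellVal (rule : String) (cells : List Int) (k : Nat) : Int :=
  applyRule rule (cells.getD ((k + cells.length - 1) % cells.length) 0)
    (cells.getD k 0) (cells.getD ((k + 1) % cells.length) 0)

theorem modeStep_eq_map (cells : List Int) (rule : String) :
    modeStep cells rule = (List.range cells.length).map (cellVal rule cells) := by
  unfold modeStep
  dsimp only
  rw [pyRange_cast]
  rw [List.foldl_map, PySem.List.foldl_append_singleton_eq_map]
  simp only [Int.toNat_natCast, List.nil_append]
  apply List.map_congr_left
  intro k hk
  rw [List.mem_range] at hk
  have hL : 0 < cells.length := by omega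
  have h1 : PySem.Int.mod ((k:Int) - 1) (cells.length:Int) = (((k + cells.length - 1) % cells.length : Nat) : Int) := by
    rw [PySem.Int.mod_eq_emod_of_pos (by exact_mod_cast hL)]
    have e1 : ((k:Int) - 1) % (cells.length:Int) = ((k:Int) - 1 + cells.length) % (cells.length:Int) :=
      (Int.add_emod_right _ _).symm
    have e2 : ((k:Int) - 1 + cells.length) = ((k + cells.length - 1 : Nat) : Int) := by omega
    rw [e1, e2, ← Int.natCast_mod]
  have h2 : PySem.Int.mod ((k:Int) + 1) (cells.length:Int) = (((k + 1) % cells.length : Nat) : Int) := by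
    rw [PySem.Int.mod_eq_emod_of_pos (by exact_mod_cast hL)]
    have e2 : ((k:Int) + 1) = ((k + 1 : Nat) : Int) := by omega
    rw [e2, ← Int.natCast_mod]
  rw [h1, h2]
  simp only [PySem.List.pyGetD_natCast]
  rfl

theorem left_getElem (cells : List Int) (i : Nat) (hi : i < cells.length) :
    (List.drop (cells.length - 1) cells ++ cells.dropLast)[i]'(by simp [List.length_drop]; omega)
      = cells.getD ((i + cells.length - 1) % cells.length) 0 := by
  have hL : 0 < cells.length := by omega
  by_cases h0 : i = 0
  · subst h0
    rw [List.getElem_append_left (by simp [List.length_drop]; omega)]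
    rw [List.getElem_drop]
    rw [List.getD_eq_getElem _ _ (by exact Nat.mod_lt _ hL)]
    congr 1
    rw [show 0 + cells.length - 1 = cells.length - 1 by omega, Nat.mod_eq_of_lt (by omega)]
    omega
  · rw [List.getElem_append_right (by simp [List.length_drop]; omega)]
    rw [List.getElem_dropLast]
    rw [List.getD_eq_getElem _ _ (by exact Nat.mod_lt _ hL)]
    have e : (i + cells.length - 1) % cells.length = i - 1 := by
      rw [show i + cells.length - 1 = (i - 1) + cells.length by omega,
          Nat.add_mod_right, Nat.mod_eq_of_lt (by omega)]
    congr 1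
    simp [List.length_drop]
    omega

theorem right_getElem (cells : List Int) (i : Nat) (hi : i < cells.length) :
    (cells.tail ++ cells.take 1)[i]'(by simp [List.length_tail]; omega)
      = cells.getD ((i + 1) % cells.length) 0 := by
  have hL : 0 < cells.length := by omega
  by_cases hlast : i = cells.length - 1
  · rw [List.getElem_append_right (by simp [List.length_tail]; omega)]
    rw [List.getD_eq_getElem _ _ (by exact Nat.mod_lt _ hL)]
    rw [List.getElem_take]
    have e : (i + 1) % cells.length = 0 := by
      rw [show i + 1 = cells.length by omega, Nat.mod_self]
    congr 1
    simp [List.length_tail]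
    omega
  · rw [List.getElem_append_left (by simp [List.length_tail]; omega)]
    rw [List.getElem_tail]
    rw [List.getD_eq_getElem _ _ (by exact Nat.mod_lt _ hL)]
    have e : (i + 1) % cells.length = i + 1 := Nat.mod_eq_of_lt (by omega)
    congr 1
    omega

theorem stepB_eq_map (cells : List Int) (rule : String) :
    stepB cells rule = (List.range cells.length).map (cellVal rule cells) := by
  unfold stepB
  dsimp only
  rw [PySem.List.slice_from_neg_one, PySem.List.slice_to_neg_one, PySem.List.slice_from_one,
      PySem.List.slice_to cells (by norm_num)]
  have h1 : (1:Int).toNat = 1 := rfl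
  rw [h1]
  split_ifs with hx hx3 ha
  · apply List.ext_getElem
    · simp [List.length_zip, List.length_drop, List.length_tail]; omega
    · intro i hi1 hi2
      simp only [List.length_map, List.length_range] at hi2
      simp only [List.getElem_map, List.getElem_zip, List.getElem_range]
      rw [left_getElem cells i hi2, right_getElem cells i hi2]
      simp [cellVal, applyRule, hx, List.getD_eq_getElem _ _ hi2]
  · apply List.ext_getElem
    · simp [List.length_zip, List.length_drop, List.length_tail]; omega
    · intro i hi1 hi2
      simp only [List.length_map, List.length_range] at hi2
      simp only [List.getElem_map, List.getElem_zip, List.getElem_range]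
      rw [left_getElem cells i hi2, right_getElem cells i hi2]
      simp [cellVal, applyRule, hx, hx3, List.getElem?_eq_getElem hi2]
  · apply List.ext_getElem
    · simp [List.length_zip, List.length_drop, List.length_tail]; omega
    · intro i hi1 hi2
      simp only [List.length_map, List.length_range] at hi2
      simp only [List.getElem_map, List.getElem_zip, List.getElem_range]
      rw [left_getElem cells i hi2, right_getElem cells i hi2]
      simp [cellVal, applyRule, hx, hx3, ha, List.getD_eq_getElem _ _ hi2]
  · apply List.ext_getElem
    · simp [List.length_zip, List.length_drop, List.length_tail]; omega
    · intro i hi1 hi2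
      simp only [List.length_map, List.length_range] at hi2
      simp only [List.getElem_map, List.getElem_zip, List.getElem_range]
      rw [left_getElem cells i hi2, right_getElem cells i hi2]
      simp [cellVal, applyRule, hx, hx3, ha, List.getD_eq_getElem _ _ hi2]

theorem stepB_eq_modeStep (cells : List Int) (rule : String) :
    stepB cells rule = modeStep cells rule := by
  rw [modeStep_eq_map, stepB_eq_map]

theorem length_modeStep (cells : List Int) (rule : String) :
    (modeStep cells rule).length = cells.length := by
  rw [modeStep_eq_map]; simp

-- t-fold iterate of A's step function
def iterStep (rule : String) (t : Nat) (s : List Int) : List Int :=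
  (fun x => modeStep x rule)^[t] s

theorem length_iterStep (rule : String) (t : Nat) (s : List Int) :
    (iterStep rule t s).length = s.length := by
  induction t with
  | zero => rfl
  | succ t ih =>
    rw [iterStep, Function.iterate_succ_apply'] at *
    rw [length_modeStep]; exact ih

-- ===== bit-plane theory =====
-- low6 x = the value of x's low six bits (Python x & 63, floor semantics)
def low6 (x : Int) : Nat := (PySem.Int.mod x 64).toNat

def bit6 (x : Int) (b : Nat) : Bool := Nat.testBit (low6 x) b

theorem low6_ofNat (n : Nat) : low6 (n : Int) = n % 64 := by
  unfold low6
  rw [PySem.Int.mod_eq_emod_of_pos (by norm_num)]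
  omega

theorem low6_negSucc (n : Nat) : low6 (Int.negSucc n) = 63 - n % 64 := by
  unfold low6
  rw [PySem.Int.mod_eq_emod_of_pos (by norm_num)]
  have h1 : (Int.negSucc n) = -1 - (n : Int) := by
    rw [Int.negSucc_eq]; ring
  rw [h1]
  have h2 : (-1 - (n:Int)) % 64 = 63 - (n:Int) % 64 := by omega
  rw [h2]
  omega

theorem low6_lt (x : Int) : low6 x < 64 := by
  unfold low6
  rw [PySem.Int.mod_eq_emod_of_pos (by norm_num)]
  have := Int.emod_lt_of_pos x (by norm_num : (0:Int) < 64)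
  omega

theorem low6_small (x : Int) (h0 : 0 ≤ x) (h1 : x < 64) : (low6 x : Int) = x := by
  unfold low6
  rw [PySem.Int.mod_eq_emod_of_pos (by norm_num)]
  rw [Int.emod_eq_of_lt h0 h1]
  omega

-- core Nat lemma: subtraction of a sub-mask is ldiff
theorem and_add_ldiff (n : Nat) : ∀ m : Nat, (n &&& m) + n.ldiff m = n := by
  induction n using Nat.binaryRec with
  | zero => intro m; simp [Nat.ldiff]
  | bit b n ih =>
    intro m
    conv_lhs => rw [← Nat.bit_bodd_div2 m]
    rw [Nat.land_bit, Nat.ldiff_bit]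
    have hb : ∀ (x : Bool) (k : Nat), Nat.bit x k = 2 * k + (if x then 1 else 0) := by
      intro x k; cases x <;> simp [Nat.bit] <;> omega
    rw [hb, hb, hb]
    have := ih m.div2
    cases b <;> cases m.bodd <;> simp <;> omega

theorem sub_and_eq_ldiff (n m : Nat) : n - (n &&& m) = n.ldiff m := by
  have h := and_add_ldiff n m
  omega

theorem sub63_eq_xor (c : Nat) (h : c < 64) : 63 - c = 63 ^^^ c := by
  revert h; revert c; decide

-- Nat-level masked homomorphisms
theorem nat_mask_xor (a b : Nat) : (a ^^^ b) % 64 = a % 64 ^^^ b % 64 := by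
  have h64 : (64:Nat) = 2^6 := rfl
  apply Nat.eq_of_testBit_eq
  intro i
  simp only [h64, Nat.testBit_mod_two_pow, Nat.testBit_xor]
  by_cases h6 : i < 6 <;> simp [h6]

theorem nat_mask_and (a b : Nat) : (a &&& b) % 64 = a % 64 &&& b % 64 := by
  have h64 : (64:Nat) = 2^6 := rfl
  apply Nat.eq_of_testBit_eq
  intro i
  simp only [h64, Nat.testBit_mod_two_pow, Nat.testBit_and]
  by_cases h6 : i < 6 <;> simp [h6]

theorem nat_mask_or (a b : Nat) : (a ||| b) % 64 = a % 64 ||| b % 64 := by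
  have h64 : (64:Nat) = 2^6 := rfl
  apply Nat.eq_of_testBit_eq
  intro i
  simp only [h64, Nat.testBit_mod_two_pow, Nat.testBit_or]
  by_cases h6 : i < 6 <;> simp [h6]

theorem mod64_lt (a : Nat) : a % 64 < 64 := Nat.mod_lt _ (by norm_num)


theorem negSucc_aux (m : Nat) : -(Int.negSucc m) - 1 = (m : Int) := by
  rw [Int.negSucc_eq]; ring

theorem not_negSucc_nonneg (m : Nat) : ¬ (0:Int) ≤ Int.negSucc m := by
  simp [Int.negSucc_eq]; omega

theorem nat_ldiff_mask1 (a b : Nat) : (a.ldiff b) % 64 = a % 64 &&& (63 - b % 64) := by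
  rw [sub63_eq_xor _ (mod64_lt b)]
  have h64 : (64:Nat) = 2^6 := rfl
  have h63 : (63:Nat) = 2^6 - 1 := rfl
  apply Nat.eq_of_testBit_eq
  intro i
  simp only [h64, h63, Nat.testBit_mod_two_pow, Nat.testBit_ldiff, Nat.testBit_and,
    Nat.testBit_xor, Nat.testBit_two_pow_sub_one]
  by_cases h6 : i < 6 <;> simp [h6]

theorem nat_neg_or_mask (a b : Nat) : 63 - (a ||| b) % 64 = (63 - a % 64) &&& (63 - b % 64) := by
  rw [sub63_eq_xor _ (mod64_lt a), sub63_eq_xor _ (mod64_lt b), sub63_eq_xor _ (mod64_lt _)]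
  have h64 : (64:Nat) = 2^6 := rfl
  have h63 : (63:Nat) = 2^6 - 1 := rfl
  apply Nat.eq_of_testBit_eq
  intro i
  simp only [h64, h63, Nat.testBit_mod_two_pow, Nat.testBit_or, Nat.testBit_and,
    Nat.testBit_xor, Nat.testBit_two_pow_sub_one]
  by_cases h6 : i < 6 <;> simp [h6]

theorem nat_neg_and_mask (a b : Nat) : 63 - (a &&& b) % 64 = (63 - a % 64) ||| (63 - b % 64) := by
  rw [sub63_eq_xor _ (mod64_lt a), sub63_eq_xor _ (mod64_lt b), sub63_eq_xor _ (mod64_lt _)]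
  have h64 : (64:Nat) = 2^6 := rfl
  have h63 : (63:Nat) = 2^6 - 1 := rfl
  apply Nat.eq_of_testBit_eq
  intro i
  simp only [h64, h63, Nat.testBit_mod_two_pow, Nat.testBit_or, Nat.testBit_and,
    Nat.testBit_xor, Nat.testBit_two_pow_sub_one]
  by_cases h6 : i < 6 <;> simp [h6]

theorem nat_ldiff_mask2 (a b : Nat) : (a.ldiff b) % 64 = (63 - b % 64) &&& a % 64 := by
  rw [nat_ldiff_mask1, Nat.and_comm]

theorem nat_or_neg_mask1 (a b : Nat) : 63 - (b.ldiff a) % 64 = a % 64 ||| (63 - b % 64) := by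
  rw [sub63_eq_xor _ (mod64_lt b), sub63_eq_xor _ (mod64_lt _)]
  have h64 : (64:Nat) = 2^6 := rfl
  have h63 : (63:Nat) = 2^6 - 1 := rfl
  apply Nat.eq_of_testBit_eq
  intro i
  simp only [h64, h63, Nat.testBit_mod_two_pow, Nat.testBit_or, Nat.testBit_ldiff,
    Nat.testBit_xor, Nat.testBit_two_pow_sub_one]
  by_cases h6 : i < 6 <;> simp [h6]
  cases a.testBit i <;> cases b.testBit i <;> rfl

theorem nat_xor_neg1 (a b : Nat) : 63 - (a ^^^ b) % 64 = a % 64 ^^^ (63 - b % 64) := by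
  rw [sub63_eq_xor _ (mod64_lt b), sub63_eq_xor _ (mod64_lt _)]
  have h64 : (64:Nat) = 2^6 := rfl
  have h63 : (63:Nat) = 2^6 - 1 := rfl
  apply Nat.eq_of_testBit_eq
  intro i
  simp only [h64, h63, Nat.testBit_mod_two_pow, Nat.testBit_xor, Nat.testBit_two_pow_sub_one]
  by_cases h6 : i < 6 <;> simp [h6]

theorem nat_xor_neg2 (a b : Nat) : (a ^^^ b) % 64 = (63 - a % 64) ^^^ (63 - b % 64) := by
  rw [sub63_eq_xor _ (mod64_lt a), sub63_eq_xor _ (mod64_lt b)]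
  have h64 : (64:Nat) = 2^6 := rfl
  have h63 : (63:Nat) = 2^6 - 1 := rfl
  apply Nat.eq_of_testBit_eq
  intro i
  simp only [h64, h63, Nat.testBit_mod_two_pow, Nat.testBit_xor, Nat.testBit_two_pow_sub_one]
  by_cases h6 : i < 6 <;> simp [h6]

-- closed forms of the PySem bitwise ops on the two sign shapes
theorem bxor_nn (n m : Nat) : PySem.Int.bxor (n:Int) (m:Int) = ((n ^^^ m : Nat) : Int) := by
  unfold PySem.Int.bxor
  rw [if_pos (Int.natCast_nonneg n), if_pos (Int.natCast_nonneg m)]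
  simp

theorem bxor_np (n m : Nat) : PySem.Int.bxor (n:Int) (Int.negSucc m) = Int.negSucc (n ^^^ m) := by
  unfold PySem.Int.bxor
  rw [if_pos (Int.natCast_nonneg n), if_neg (not_negSucc_nonneg m), negSucc_aux]
  simp [Int.negSucc_eq]
  omega

theorem bxor_pn (n m : Nat) : PySem.Int.bxor (Int.negSucc n) (m:Int) = Int.negSucc (n ^^^ m) := by
  unfold PySem.Int.bxor
  rw [if_neg (not_negSucc_nonneg n), if_pos (Int.natCast_nonneg m), negSucc_aux]
  simp [Int.negSucc_eq]
  omega

theorem bxor_pp (n m : Nat) : PySem.Int.bxor (Int.negSucc n) (Int.negSucc m) = ((n ^^^ m : Nat) : Int) := by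
  unfold PySem.Int.bxor
  rw [if_neg (not_negSucc_nonneg n), if_neg (not_negSucc_nonneg m), negSucc_aux, negSucc_aux]
  simp

theorem band_nn (n m : Nat) : PySem.Int.band (n:Int) (m:Int) = ((n &&& m : Nat) : Int) := by
  unfold PySem.Int.band
  rw [if_pos (Int.natCast_nonneg n), if_pos (Int.natCast_nonneg m)]
  simp

theorem band_np (n m : Nat) : PySem.Int.band (n:Int) (Int.negSucc m) = ((n.ldiff m : Nat) : Int) := by
  unfold PySem.Int.band
  rw [if_pos (Int.natCast_nonneg n), if_neg (not_negSucc_nonneg m), negSucc_aux]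
  simp only [Int.toNat_natCast]
  rw [sub_and_eq_ldiff]

theorem band_pn (n m : Nat) : PySem.Int.band (Int.negSucc n) (m:Int) = ((m.ldiff n : Nat) : Int) := by
  unfold PySem.Int.band
  rw [if_neg (not_negSucc_nonneg n), if_pos (Int.natCast_nonneg m), negSucc_aux]
  simp only [Int.toNat_natCast]
  rw [sub_and_eq_ldiff]

theorem band_pp (n m : Nat) : PySem.Int.band (Int.negSucc n) (Int.negSucc m) = Int.negSucc (n ||| m) := by
  unfold PySem.Int.band
  rw [if_neg (not_negSucc_nonneg n), if_neg (not_negSucc_nonneg m), negSucc_aux, negSucc_aux]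
  simp [Int.negSucc_eq]
  omega

theorem bor_nn (n m : Nat) : PySem.Int.bor (n:Int) (m:Int) = ((n ||| m : Nat) : Int) := by
  unfold PySem.Int.bor
  rw [if_pos (Int.natCast_nonneg n), if_pos (Int.natCast_nonneg m)]
  simp

theorem bor_np (n m : Nat) : PySem.Int.bor (n:Int) (Int.negSucc m) = Int.negSucc (m.ldiff n) := by
  unfold PySem.Int.bor
  rw [if_pos (Int.natCast_nonneg n), if_neg (not_negSucc_nonneg m), negSucc_aux]
  simp only [Int.toNat_natCast]
  rw [sub_and_eq_ldiff]
  simp [Int.negSucc_eq]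
  omega

theorem bor_pn (n m : Nat) : PySem.Int.bor (Int.negSucc n) (m:Int) = Int.negSucc (n.ldiff m) := by
  unfold PySem.Int.bor
  rw [if_neg (not_negSucc_nonneg n), if_pos (Int.natCast_nonneg m), negSucc_aux]
  simp only [Int.toNat_natCast]
  rw [sub_and_eq_ldiff]
  simp [Int.negSucc_eq]
  omega

theorem bor_pp (n m : Nat) : PySem.Int.bor (Int.negSucc n) (Int.negSucc m) = Int.negSucc (n &&& m) := by
  unfold PySem.Int.bor
  rw [if_neg (not_negSucc_nonneg n), if_neg (not_negSucc_nonneg m), negSucc_aux, negSucc_aux]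
  simp [Int.negSucc_eq]
  omega

theorem low6_bxor (x y : Int) : low6 (PySem.Int.bxor x y) = low6 x ^^^ low6 y := by
  cases x with
  | ofNat n =>
    cases y with
    | ofNat m =>
      rw [Int.ofNat_eq_natCast, Int.ofNat_eq_natCast, bxor_nn, low6_ofNat, low6_ofNat, low6_ofNat]
      exact nat_mask_xor n m
    | negSucc m =>
      rw [Int.ofNat_eq_natCast, bxor_np, low6_negSucc, low6_ofNat, low6_negSucc]
      exact nat_xor_neg1 n m
  | negSucc n =>
    cases y with
    | ofNat m =>
      rw [Int.ofNat_eq_natCast, bxor_pn, low6_negSucc, low6_negSucc, low6_ofNat]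
      rw [Nat.xor_comm (63 - n % 64), ← nat_xor_neg1 m n, Nat.xor_comm n m]
    | negSucc m =>
      rw [bxor_pp, low6_ofNat, low6_negSucc, low6_negSucc]
      exact nat_xor_neg2 n m

theorem low6_band (x y : Int) : low6 (PySem.Int.band x y) = low6 x &&& low6 y := by
  cases x with
  | ofNat n =>
    cases y with
    | ofNat m =>
      rw [Int.ofNat_eq_natCast, Int.ofNat_eq_natCast, band_nn, low6_ofNat, low6_ofNat, low6_ofNat]
      exact nat_mask_and n m
    | negSucc m =>
      rw [Int.ofNat_eq_natCast, band_np, low6_ofNat, low6_ofNat, low6_negSucc]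
      exact nat_ldiff_mask1 n m
  | negSucc n =>
    cases y with
    | ofNat m =>
      rw [Int.ofNat_eq_natCast, band_pn, low6_ofNat, low6_negSucc, low6_ofNat]
      exact nat_ldiff_mask2 m n
    | negSucc m =>
      rw [band_pp, low6_negSucc, low6_negSucc, low6_negSucc]
      exact nat_neg_or_mask n m

theorem low6_bor (x y : Int) : low6 (PySem.Int.bor x y) = low6 x ||| low6 y := by
  cases x with
  | ofNat n =>
    cases y with
    | ofNat m =>
      rw [Int.ofNat_eq_natCast, Int.ofNat_eq_natCast, bor_nn, low6_ofNat, low6_ofNat, low6_ofNat]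
      exact nat_mask_or n m
    | negSucc m =>
      rw [Int.ofNat_eq_natCast, bor_np, low6_negSucc, low6_ofNat, low6_negSucc]
      exact nat_or_neg_mask1 n m
  | negSucc n =>
    cases y with
    | ofNat m =>
      rw [Int.ofNat_eq_natCast, bor_pn, low6_negSucc, low6_negSucc, low6_ofNat]
      rw [Nat.or_comm (63 - n % 64), ← nat_or_neg_mask1 m n]
    | negSucc m =>
      rw [bor_pp, low6_negSucc, low6_negSucc, low6_negSucc]
      exact nat_neg_and_mask n m

theorem band63_canon (x : Int) : PySem.Int.band x 63 = ((low6 (PySem.Int.band x 63) : Nat) : Int) := by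
  have h63 : (63 : Int) = ((63 : Nat) : Int) := rfl
  cases x with
  | ofNat n =>
    rw [Int.ofNat_eq_natCast, h63, band_nn]
    have h1 : n &&& 63 < 64 := by
      have := Nat.and_le_right (n := n) (m := 63); omega
    rw [low6_small _ (by positivity) (by exact_mod_cast h1)]
  | negSucc n =>
    rw [h63, band_pn]
    have h1 : (63:Nat).ldiff n < 64 := by
      have h2 := and_add_ldiff 63 n
      omega
    rw [low6_small _ (by positivity) (by exact_mod_cast h1)]

theorem bit6_applyRule (rule : String) (l c r : Int) (b : Nat) (hb : b < 6) :
    bit6 (applyRule rule l c r) b =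
      if rule = "xor" then xor (bit6 l b) (bit6 r b)
      else if rule = "xor3" then xor (xor (bit6 l b) (bit6 c b)) (bit6 r b)
      else if rule = "and" then (bit6 l b && bit6 r b)
      else (bit6 l b || bit6 r b) := by
  have h63b : (63:Nat).testBit b = true := by
    rw [show (63:Nat) = 2^6-1 from rfl, Nat.testBit_two_pow_sub_one]; simp [hb]
  have h63 : low6 (63 : Int) = 63 := by decide
  unfold applyRule
  split_ifs <;>
    simp [bit6, low6_bxor, low6_band, low6_bor, h63, h63b,
      Nat.testBit_xor, Nat.testBit_and, Nat.testBit_or]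

-- getD characterization of modeStep
theorem modeStep_getD (cells : List Int) (rule : String) (k : Nat) :
    (modeStep cells rule).getD k 0 = if k < cells.length then cellVal rule cells k else 0 := by
  rw [modeStep_eq_map]
  by_cases h : k < cells.length
  · rw [if_pos h, List.getD_eq_getElem _ _ (by simpa using h)]
    simp
  · rw [if_neg h, List.getD_eq_default _ _ (by simpa using Nat.le_of_not_lt h)]

-- plane b is preserved by a step: equal planes give equal planes
theorem plane_modeStep (rule : String) (b : Nat) (hb : b < 6) (s1 s2 : List Int)
    (hlen : s1.length = s2.length)
    (hp : ∀ k, bit6 (s1.getD k 0) b = bit6 (s2.getD k 0) b) :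
    ∀ k, bit6 ((modeStep s1 rule).getD k 0) b = bit6 ((modeStep s2 rule).getD k 0) b := by
  intro k
  rw [modeStep_getD, modeStep_getD, ← hlen]
  by_cases h : k < s1.length
  · rw [if_pos h, if_pos h]
    unfold cellVal
    rw [← hlen]
    rw [bit6_applyRule _ _ _ _ _ hb, bit6_applyRule _ _ _ _ _ hb]
    rw [hp, hp, hp]
  · rw [if_neg h, if_neg h]

theorem plane_iter (rule : String) (b : Nat) (hb : b < 6) (s1 s2 : List Int)
    (hlen : s1.length = s2.length)
    (hp : ∀ k, bit6 (s1.getD k 0) b = bit6 (s2.getD k 0) b) :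
    ∀ t k, bit6 ((iterStep rule t s1).getD k 0) b = bit6 ((iterStep rule t s2).getD k 0) b := by
  intro t
  induction t with
  | zero => exact hp
  | succ t ih =>
    have hl : (iterStep rule t s1).length = (iterStep rule t s2).length := by
      rw [length_iterStep, length_iterStep, hlen]
    intro k
    unfold iterStep
    rw [Function.iterate_succ_apply', Function.iterate_succ_apply']
    exact plane_modeStep rule b hb _ _ hl ih k

-- canonical range of step outputs
theorem applyRule_canon (rule : String) (l c r : Int) :
    applyRule rule l c r = ((low6 (applyRule rule l c r) : Nat) : Int) := by
  unfold applyRule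
  split_ifs <;> exact band63_canon _

theorem eq_iff_planes (x y : Int)
    (hx : x = ((low6 x : Nat) : Int)) (hy : y = ((low6 y : Nat) : Int)) :
    x = y ↔ ∀ b, b < 6 → bit6 x b = bit6 y b := by
  constructor
  · intro h b _; rw [h]
  · intro h
    rw [hx, hy]
    congr 1
    apply Nat.eq_of_testBit_eq
    intro i
    by_cases h6 : i < 6
    · exact h i h6
    · have h1 : low6 x < 2 ^ i := lt_of_lt_of_le (low6_lt x) (by
        calc (64:Nat) = 2^6 := rfl
        _ ≤ 2^i := Nat.pow_le_pow_right (by norm_num) (by omega))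
      have h2 : low6 y < 2 ^ i := lt_of_lt_of_le (low6_lt y) (by
        calc (64:Nat) = 2^6 := rfl
        _ ≤ 2^i := Nat.pow_le_pow_right (by norm_num) (by omega))
      rw [Nat.testBit_eq_false_of_lt h1, Nat.testBit_eq_false_of_lt h2]

theorem bump_spec (f : Int → Int) : ∀ (m : Nat) (row : List Int), m ≤ row.length →
    (@List.map Nat Int (fun k => (k:Int)) (List.range m)).foldl
      (fun r i => PySem.List.pySetD r i (PySem.List.pyGetD r i 0 + f i)) row
    = (List.range row.length).map (fun k => if k < m then row.getD k 0 + f (k:Int) else row.getD k 0) := by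
  intro m
  induction m with
  | zero =>
    intro row _
    simp only [List.range_zero, List.map_nil, List.foldl_nil]
    apply List.ext_getElem
    · simp
    · intro i h1 h2
      simp only [List.getElem_map, List.getElem_range, if_neg (by omega : ¬ i < 0)]
      exact (List.getD_eq_getElem row 0 h1).symm
  | succ m ih =>
    intro row hm
    rw [List.range_succ, List.map_append, List.foldl_append, ih row (by omega)]
    simp only [List.map_cons, List.map_nil, List.foldl_cons, List.foldl_nil]
    rw [PySem.List.pySetD_natCast, PySem.List.pyGetD_natCast]
    rw [PySem.List.getD_map_range _ _ _ _ (by omega)]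
    rw [if_neg (by omega)]
    apply List.ext_getElem
    · simp
    · intro i h1 h2
      simp only [List.length_set, List.length_map, List.length_range] at h1
      rw [List.getElem_set]
      by_cases hi : i = m
      · subst hi
        rw [if_pos rfl]
        rw [List.getElem_map, List.getElem_range, if_pos (by omega)]
      · rw [if_neg (Ne.symm hi)]
        simp only [List.getElem_map, List.getElem_range]
        by_cases hlt : i < m
        · rw [if_pos hlt, if_pos (by omega)]
        · rw [if_neg hlt, if_neg (by omega)]

-- the body of A's time loop, abstracted over the cell count L
def tBody (rule : String) (L : Nat) (st : List (List Int) × List Int × List Int) (t : Int) :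
    List (List Int) × List Int × List Int :=
  let row := (PySem.List.pyRange 0 (L:Int) 1).foldl (fun row i =>
      PySem.List.pySetD row i (PySem.List.pyGetD row i 0 +
        (if PySem.List.pyGetD st.2.1 i 0 ≠ PySem.List.pyGetD st.2.2 i 0 then (1:Int) else 0)))
    (PySem.List.pyGetD st.1 t [])
  (PySem.List.pySetD st.1 t row, modeStep st.2.1 rule, modeStep st.2.2 rule)

-- indicator that the two evolutions differ at step t, cell k
def dInd (rule : String) (s1 s2 : List Int) (t k : Nat) : Int :=
  if (iterStep rule t s1).getD k 0 ≠ (iterStep rule t s2).getD k 0 then 1 else 0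

theorem tloop_spec (rule : String) (L : Nat) (s1 s2 : List Int) :
    ∀ (n : Nat) (agg : List (List Int)), n ≤ agg.length → (∀ r ∈ agg, r.length = L) →
    (@List.map Nat Int (fun t => (t:Int)) (List.range n)).foldl (tBody rule L) (agg, s1, s2)
    = ((List.range agg.length).map (fun t =>
         if t < n then (List.range L).map (fun k => (agg.getD t []).getD k 0 + dInd rule s1 s2 t k)
         else agg.getD t []),
       iterStep rule n s1, iterStep rule n s2) := by
  intro n
  induction n with
  | zero =>
    intro agg _ _
    simp only [List.range_zero, List.map_nil, List.foldl_nil, iterStep, Function.iterate_zero_apply]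
    congr 1
    have := list_eq_map_getD agg []
    conv_lhs => rw [← this]
    apply List.map_congr_left
    intro t ht
    rw [if_neg (by omega)]
  | succ n ih =>
    intro agg hn hrow
    rw [List.range_succ, List.map_append, List.foldl_append, ih agg (by omega) hrow]
    simp only [List.map_cons, List.map_nil, List.foldl_cons, List.foldl_nil]
    unfold tBody
    dsimp only
    have hget : PySem.List.pyGetD ((List.range agg.length).map (fun t =>
         if t < n then (List.range L).map (fun k => (agg.getD t []).getD k 0 + dInd rule s1 s2 t k)
         else agg.getD t []) : List (List Int)) (n : Int) ([] : List Int) = agg.getD n [] := by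
      rw [PySem.List.pyGetD_natCast, PySem.List.getD_map_range _ _ _ _ (by omega), if_neg (by omega)]
    rw [hget]
    have hrl : (agg.getD n []).length = L := by
      have hmem : agg.getD n [] ∈ agg := by
        rw [List.getD_eq_getElem _ _ (by omega)]
        exact List.getElem_mem _
      exact hrow _ hmem
    rw [pyRange_cast]
    have e6 : ((L:Int)).toNat = L := by omega
    rw [e6]
    rw [bump_spec _ L (agg.getD n []) (by omega)]
    simp only [Prod.mk.injEq]
    refine ⟨?_, ?_, ?_⟩
    · rw [PySem.List.pySetD_natCast]
      apply List.ext_getElem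
      · simp
      · intro i h1 h2
        simp only [List.length_set, List.length_map, List.length_range] at h1 h2
        rw [List.getElem_set]
        by_cases hi : i = n
        · subst hi
          rw [if_pos rfl, List.getElem_map, List.getElem_range, if_pos (by omega)]
          rw [hrl]
          apply List.map_congr_left
          intro k hk
          rw [List.mem_range] at hk
          rw [if_pos (by omega)]
          simp [dInd, PySem.List.pyGetD_natCast]
        · rw [if_neg (Ne.symm hi)]
          simp only [List.getElem_map, List.getElem_range]
          by_cases hlt : i < n
          · rw [if_pos hlt, if_pos (by omega)]
          · rw [if_neg hlt, if_neg (by omega)]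
    · exact ((Function.iterate_succ_apply' (fun x => modeStep x rule) n s1).symm.trans
        (Function.iterate_succ_apply _ n s1))
    · exact ((Function.iterate_succ_apply' (fun x => modeStep x rule) n s2).symm.trans
        (Function.iterate_succ_apply _ n s2))

theorem stage_spec (rule : String) (L : Nat) (s1 s2 : List Int) (g : Nat → Nat → Int) (n : Nat) :
    ((@List.map Nat Int (fun t => (t:Int)) (List.range n)).foldl (tBody rule L)
       ((List.range n).map (fun t => (List.range L).map (fun k => g t k)), s1, s2)).1
    = (List.range n).map (fun t => (List.range L).map (fun k => g t k + dInd rule s1 s2 t k)) := by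
  rw [tloop_spec rule L s1 s2 n _ (by simp) (by intro r hr; simp at hr; obtain ⟨t, _, h⟩ := hr; simp [← h])]
  simp only [List.length_map, List.length_range]
  apply List.map_congr_left
  intro t ht
  rw [List.mem_range] at ht
  rw [if_pos ht]
  rw [PySem.List.getD_map_range _ _ _ _ ht]
  apply List.map_congr_left
  intro k hk
  rw [List.mem_range] at hk
  rw [PySem.List.getD_map_range _ _ _ _ hk]

theorem stage_spec' (rule : String) (L : Nat) (s1 s2 : List Int) (g : Nat → Nat → Int) (n : Nat) :
    ((@List.map Nat Int (fun t => (t:Int)) (List.range n)).foldl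
      (fun (st : List (List Int) × List Int × List Int) t =>
        (PySem.List.pySetD st.1 t
          ((PySem.List.pyRange 0 (L:Int) 1).foldl (fun row i =>
            PySem.List.pySetD row i (PySem.List.pyGetD row i 0 +
              (if PySem.List.pyGetD st.2.1 i 0 ≠ PySem.List.pyGetD st.2.2 i 0 then (1:Int) else 0)))
          (PySem.List.pyGetD st.1 t [])),
         modeStep st.2.1 rule, modeStep st.2.2 rule))
      ((List.range n).map (fun t => (List.range L).map (fun k => g t k)), s1, s2)).1
    = (List.range n).map (fun t => (List.range L).map (fun k => g t k + dInd rule s1 s2 t k)) :=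
  stage_spec rule L s1 s2 g n

-- B's time loop: collected rows are comparisons of the two iterated states
theorem coneB_fold {α : Type} (rule : String) (cmp : Int → Int → Int) (l : List α) :
    ∀ (acc : List (List Int)) (s1 s2 : List Int),
    (l.foldl (fun (st : List (List Int) × List Int × List Int) _ =>
        (st.1 ++ [(st.2.1.zip st.2.2).map (fun p => cmp p.1 p.2)],
         stepB st.2.1 rule, stepB st.2.2 rule)) (acc, s1, s2))
    = (acc ++ (List.range l.length).map (fun t =>
         ((iterStep rule t s1).zip (iterStep rule t s2)).map (fun p => cmp p.1 p.2)),
       iterStep rule l.length s1, iterStep rule l.length s2) := by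
  induction l with
  | nil => intro acc s1 s2; simp [iterStep]
  | cons x l ih =>
    intro acc s1 s2
    rw [List.foldl_cons]
    dsimp only
    rw [stepB_eq_modeStep, stepB_eq_modeStep, ih]
    simp only [Prod.mk.injEq]
    refine ⟨?_, ?_, ?_⟩
    · rw [List.length_cons, List.range_succ_eq_map, List.map_cons, List.map_map,
          List.append_assoc, List.singleton_append]
      congr 2
    · simp [iterStep, List.length_cons, Function.iterate_succ_apply]
    · simp [iterStep, List.length_cons, Function.iterate_succ_apply]

-- normalization of the (possibly negative) Python index j
def normIdx (n : Nat) (j : Int) : Nat := if 0 ≤ j then j.toNat else n - (-j).toNat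

theorem normIdx_lt (n : Nat) (j : Int) (h : PySem.Raise.InRange n j) : normIdx n j < n := by
  obtain ⟨h1, h2⟩ := h
  unfold normIdx
  split_ifs with hs <;> omega

theorem pyIdx?_norm (n : Nat) (j : Int) (h : PySem.Raise.InRange n j) :
    PySem.List.pyIdx? n j = some (normIdx n j) := by
  obtain ⟨h1, h2⟩ := h
  unfold PySem.List.pyIdx? normIdx
  split_ifs with hs <;> simp_all <;> omega

theorem pySetD_norm (xs : List Int) (j : Int) (v : Int) (h : PySem.Raise.InRange xs.length j) :
    PySem.List.pySetD xs j v = xs.set (normIdx xs.length j) v := by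
  unfold PySem.List.pySetD PySem.List.pySet?
  rw [pyIdx?_norm _ _ h]
  rfl

theorem pyGetD_norm (xs : List Int) (j : Int) (d : Int) (h : PySem.Raise.InRange xs.length j) :
    PySem.List.pyGetD xs j d = xs.getD (normIdx xs.length j) d := by
  unfold PySem.List.pyGetD PySem.List.pyGet?
  rw [pyIdx?_norm _ _ h]
  simp [List.getD]

-- flipping one bit / all six bits of cell jn: effect on a single plane
theorem bit6_bxor_pow (x : Int) (b b' : Nat) (hb : b < 6) (hb' : b' < 6) :
    bit6 (PySem.Int.bxor x ((2^b : Nat) : Int)) b' = xor (bit6 x b') (decide (b = b')) := by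
  unfold bit6
  rw [low6_bxor, low6_ofNat, Nat.mod_eq_of_lt (by
    have : (2:Nat)^b < 2^6 := Nat.pow_lt_pow_right (by norm_num) hb
    simpa using this)]
  rw [Nat.testBit_xor, Nat.testBit_two_pow]

theorem bit6_bxor_63 (x : Int) (b : Nat) (hb : b < 6) :
    bit6 (PySem.Int.bxor x ((63 : Nat) : Int)) b = ! (bit6 x b) := by
  unfold bit6
  rw [low6_bxor, low6_ofNat]
  have h63 : (63:Nat) % 64 = 63 := by norm_num
  rw [h63, Nat.testBit_xor, show (63:Nat) = 2^6-1 from rfl, Nat.testBit_two_pow_sub_one]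
  simp [hb]

-- the two perturbed initial states agree on plane b (b-th bit flip vs all-six flip)
theorem init_plane_same (ic : List Int) (jn : Nat) (hjn : jn < ic.length) (b : Nat) (hb : b < 6) :
    ∀ k, bit6 ((ic.set jn (PySem.Int.bxor (ic.getD jn 0) ((2^b : Nat) : Int))).getD k 0) b
       = bit6 ((ic.set jn (PySem.Int.bxor (ic.getD jn 0) ((63 : Nat) : Int))).getD k 0) b := by
  intro k
  by_cases hk : k = jn
  · subst hk
    rw [show (ic.set k (PySem.Int.bxor (ic.getD k 0) ((2^b : Nat) : Int))).getD k 0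
          = PySem.Int.bxor (ic.getD k 0) ((2^b : Nat) : Int) by
        simp [List.getD, List.getElem?_set_self (by simpa using hjn)]]
    rw [show (ic.set k (PySem.Int.bxor (ic.getD k 0) ((63 : Nat) : Int))).getD k 0
          = PySem.Int.bxor (ic.getD k 0) ((63 : Nat) : Int) by
        simp [List.getD, List.getElem?_set_self (by simpa using hjn)]]
    rw [bit6_bxor_pow _ _ _ hb hb, bit6_bxor_63 _ _ hb]
    simp
  · rw [show (ic.set jn (PySem.Int.bxor (ic.getD jn 0) ((2^b : Nat) : Int))).getD k 0 = ic.getD k 0 by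
        simp [List.getD, List.getElem?_set_ne (fun h => hk h.symm)]]
    rw [show (ic.set jn (PySem.Int.bxor (ic.getD jn 0) ((63 : Nat) : Int))).getD k 0 = ic.getD k 0 by
        simp [List.getD, List.getElem?_set_ne (fun h => hk h.symm)]]

-- the b-th bit flip leaves every other plane of the initial state unchanged
theorem init_plane_other (ic : List Int) (jn : Nat) (hjn : jn < ic.length) (b b' : Nat)
    (hb : b < 6) (hb' : b' < 6) (hne : b ≠ b') :
    ∀ k, bit6 ((ic.set jn (PySem.Int.bxor (ic.getD jn 0) ((2^b : Nat) : Int))).getD k 0) b'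
       = bit6 (ic.getD k 0) b' := by
  intro k
  by_cases hk : k = jn
  · subst hk
    rw [show (ic.set k (PySem.Int.bxor (ic.getD k 0) ((2^b : Nat) : Int))).getD k 0
          = PySem.Int.bxor (ic.getD k 0) ((2^b : Nat) : Int) by
        simp [List.getD, List.getElem?_set_self (by simpa using hjn)]]
    rw [bit6_bxor_pow _ _ _ hb hb']
    simp [hne]
  · rw [show (ic.set jn (PySem.Int.bxor (ic.getD jn 0) ((2^b : Nat) : Int))).getD k 0 = ic.getD k 0 by
        simp [List.getD, List.getElem?_set_ne (fun h => hk h.symm)]]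

-- entries of an evolved state are canonical 6-bit values (t ≥ 1)
theorem iter_canon (rule : String) (t : Nat) (s : List Int) (k : Nat) :
    (iterStep rule (t+1) s).getD k 0 = ((low6 ((iterStep rule (t+1) s).getD k 0) : Nat) : Int) := by
  rw [iterStep, Function.iterate_succ_apply']
  rw [modeStep_getD]
  split_ifs
  · rw [show (fun x => modeStep x rule)^[t] s = iterStep rule t s from rfl]
    exact applyRule_canon _ _ _ _
  · decide

-- difference of the bit-b experiment detected on plane b
theorem diff_iff_plane (rule : String) (ic : List Int) (jn : Nat) (hjn : jn < ic.length)
    (b : Nat) (hb : b < 6) (t k : Nat) :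
    ((iterStep rule t ic).getD k 0
       ≠ (iterStep rule t (ic.set jn (PySem.Int.bxor (ic.getD jn 0) ((2^b : Nat) : Int)))).getD k 0)
    ↔ (bit6 ((iterStep rule t ic).getD k 0) b
       ≠ bit6 ((iterStep rule t (ic.set jn (PySem.Int.bxor (ic.getD jn 0) ((2^b : Nat) : Int)))).getD k 0) b) := by
  set ic2 := ic.set jn (PySem.Int.bxor (ic.getD jn 0) ((2^b : Nat) : Int)) with hic2
  constructor
  · -- values differ → plane b differs
    intro hne
    cases t with
    | zero =>
      simp only [iterStep, Function.iterate_zero_apply] at hne ⊢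
      by_cases hk : k = jn
      · subst hk
        rw [hic2, show (ic.set k (PySem.Int.bxor (ic.getD k 0) ((2^b : Nat) : Int))).getD k 0
              = PySem.Int.bxor (ic.getD k 0) ((2^b : Nat) : Int) by
            simp [List.getD, List.getElem?_set_self (by simpa using hjn)]]
        rw [bit6_bxor_pow _ _ _ hb hb]
        simp
      · exfalso
        apply hne
        rw [hic2, show (ic.set jn (PySem.Int.bxor (ic.getD jn 0) ((2^b : Nat) : Int))).getD k 0 = ic.getD k 0 by
            simp [List.getD, List.getElem?_set_ne (fun h => hk h.symm)]]
    | succ t' =>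
      intro hplane
      apply hne
      rw [eq_iff_planes _ _ (iter_canon rule t' ic k) (iter_canon rule t' ic2 k)]
      intro b' hb'
      by_cases hbb : b = b'
      · subst hbb; exact hplane
      · -- other planes never differ in the bit-b experiment
        have hp := plane_iter rule b' hb' ic2 ic (by rw [hic2]; simp) (fun k' => by
          rw [hic2]
          exact init_plane_other ic jn hjn b b' hb hb' hbb k') (t'+1) k
        rw [hp]
  · intro hplane hval
    exact hplane (by rw [hval])

-- one popcount term is the plane-b disagreement indicator
theorem popterm_eq (x y : Int) (b : Nat) (hb : b < 6) :
    PySem.Int.band (shiftR (PySem.Int.band (PySem.Int.bxor x y) 63) b) 1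
      = if bit6 x b ≠ bit6 y b then (1:Int) else 0 := by
  have hz := band63_canon (PySem.Int.bxor x y)
  set m := low6 (PySem.Int.band (PySem.Int.bxor x y) 63) with hm
  rw [hz]
  unfold shiftR
  rw [← Int.natCast_shiftRight, show (1:Int) = ((1:Nat):Int) from rfl, band_nn]
  have hand1 : m >>> b &&& 1 = if (m >>> b).testBit 0 then 1 else 0 := by
    rw [Nat.and_one_is_mod]
    rcases Nat.mod_two_eq_zero_or_one (m >>> b) with h | h <;> simp [Nat.testBit_zero, h]
  rw [hand1, Nat.testBit_shiftRight, Nat.add_zero]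
  have hmb : m.testBit b = xor (bit6 x b) (bit6 y b) := by
    rw [hm, low6_band, low6_bxor]
    have h63 : low6 (63:Int) = 63 := by decide
    rw [h63, Nat.testBit_and, Nat.testBit_xor, show (63:Nat) = 2^6-1 from rfl,
        Nat.testBit_two_pow_sub_one]
    simp [hb, bit6]
  rw [hmb]
  cases hx : bit6 x b <;> cases hy : bit6 y b <;> simp

theorem popcount6_eq (x y : Int) :
    popcount6 (PySem.Int.band (PySem.Int.bxor x y) 63)
      = ((List.range 6).map (fun b => if bit6 x b ≠ bit6 y b then (1:Int) else 0)).sum := by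
  unfold popcount6
  rw [show (6:Int) = ((6:Nat):Int) from rfl, pyRange_cast, List.map_map]
  apply congrArg List.sum
  apply List.map_congr_left
  intro b hb
  rw [List.mem_range] at hb
  simp only [Function.comp_apply]
  rw [Int.toNat_natCast]
  exact popterm_eq x y b (by simpa using hb)

theorem zipmap_eq (cmp : Int → Int → Int) (s1 s2 : List Int) (h1 : s1.length = s2.length) :
    (s1.zip s2).map (fun p => cmp p.1 p.2)
      = (List.range s1.length).map (fun k => cmp (s1.getD k 0) (s2.getD k 0)) := by
  apply List.ext_getElem
  · simp [List.length_zip]; omega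
  · intro i hi1 hi2
    simp only [List.length_map, List.length_range] at hi2
    simp only [List.getElem_map, List.getElem_zip, List.getElem_range]
    rw [List.getD_eq_getElem _ _ hi2, List.getD_eq_getElem _ _ (by omega)]

theorem cone_cell (rule : String) (ic : List Int) (jn : Nat) (hjn : jn < ic.length) (t k : Nat) :
    ((((((0 + dInd rule ic (ic.set jn (PySem.Int.bxor (ic.getD jn 0) ((2^0:Nat):Int))) t k)
      + dInd rule ic (ic.set jn (PySem.Int.bxor (ic.getD jn 0) ((2^1:Nat):Int))) t k)
      + dInd rule ic (ic.set jn (PySem.Int.bxor (ic.getD jn 0) ((2^2:Nat):Int))) t k)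
      + dInd rule ic (ic.set jn (PySem.Int.bxor (ic.getD jn 0) ((2^3:Nat):Int))) t k)
      + dInd rule ic (ic.set jn (PySem.Int.bxor (ic.getD jn 0) ((2^4:Nat):Int))) t k)
      + dInd rule ic (ic.set jn (PySem.Int.bxor (ic.getD jn 0) ((2^5:Nat):Int))) t k)
    = popcount6 (PySem.Int.band (PySem.Int.bxor ((iterStep rule t ic).getD k 0)
        ((iterStep rule t (ic.set jn (PySem.Int.bxor (ic.getD jn 0) (63:Int)))).getD k 0)) 63) := by
  rw [popcount6_eq]
  rw [show List.range 6 = [0,1,2,3,4,5] from rfl]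
  simp only [List.map_cons, List.map_nil, List.sum_cons, List.sum_nil]
  have hd : ∀ b : Nat, b < 6 →
      dInd rule ic (ic.set jn (PySem.Int.bxor (ic.getD jn 0) ((2^b:Nat):Int))) t k
      = if bit6 ((iterStep rule t ic).getD k 0) b
           ≠ bit6 ((iterStep rule t (ic.set jn (PySem.Int.bxor (ic.getD jn 0) (63:Int)))).getD k 0) b
        then (1:Int) else 0 := by
    intro b hb
    have hsame := plane_iter rule b hb _ _ (by simp)
      (init_plane_same ic jn hjn b hb) t k
    rw [show ((63:Nat):Int) = (63:Int) from rfl] at hsame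
    unfold dInd
    simp only [diff_iff_plane rule ic jn hjn b hb t k, hsame]
  rw [hd 0 (by norm_num), hd 1 (by norm_num), hd 2 (by norm_num), hd 3 (by norm_num),
      hd 4 (by norm_num), hd 5 (by norm_num)]
  ring

theorem main_eq (ic : List Int) (j : Int) (rule : String) (T : Int)
    (hpre : PySem.Raise.InRange ic.length j) :
    perturbation_cone ic j rule T = perturbation_cone_alt ic j rule T := by
  have hjn := normIdx_lt ic.length j hpre
  set jn := normIdx ic.length j with hjndef
  have hset : ∀ v : Int, PySem.List.pySetD ic j v = ic.set jn v := fun v => pySetD_norm ic j v hpre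
  have hget : PySem.List.pyGetD ic j 0 = ic.getD jn 0 := pyGetD_norm ic j 0 hpre
  unfold perturbation_cone perturbation_cone_alt
  dsimp only
  have h6 : PySem.List.pyRange 0 6 1 = [0,1,2,3,4,5] := by decide
  rw [h6]
  simp only [List.foldl_cons, List.foldl_nil]
  rw [pyRange_cast (min T 16)]
  have hrep : List.replicate ic.length (0:Int) = (List.range ic.length).map (fun _ => (0:Int)) := by
    simp [List.map_const']
  rw [hrep, List.map_map]
  simp only [Function.comp_def]
  rw [stage_spec', stage_spec', stage_spec', stage_spec', stage_spec', stage_spec']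
  -- B side: characterize the fold
  rw [coneB_fold rule (fun a b => if 4 ≤ popcount6 (PySem.Int.band (PySem.Int.bxor a b) 63) then (1:Int) else 0)]
  simp only [List.nil_append, List.length_map, List.length_range]
  -- rewrite the perturbed initial states through the index normalization
  rw [hset, hset, hset, hset, hset, hset, hset, hget]
  rw [show (1:Int) <<< (((0:Int).toNat : Nat) : Int) = ((2^0:Nat):Int) from by decide,
      show (1:Int) <<< (((1:Int).toNat : Nat) : Int) = ((2^1:Nat):Int) from by decide,
      show (1:Int) <<< (((2:Int).toNat : Nat) : Int) = ((2^2:Nat):Int) from by decide,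
      show (1:Int) <<< (((3:Int).toNat : Nat) : Int) = ((2^3:Nat):Int) from by decide,
      show (1:Int) <<< (((4:Int).toNat : Nat) : Int) = ((2^4:Nat):Int) from by decide,
      show (1:Int) <<< (((5:Int).toNat : Nat) : Int) = ((2^5:Nat):Int) from by decide]
  rw [List.map_map]
  apply List.map_congr_left
  intro t ht
  rw [List.mem_range] at ht
  simp only [Function.comp_def]
  rw [zipmap_eq (fun a b => if 4 ≤ popcount6 (PySem.Int.band (PySem.Int.bxor a b) 63) then (1:Int) else 0) _ _ (by rw [length_iterStep, length_iterStep]; simp)]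
  rw [length_iterStep, List.map_map]
  apply List.map_congr_left
  intro k hk
  rw [List.mem_range] at hk
  simp only [Function.comp_apply]
  rw [← cone_cell rule ic jn hjn t k]
  rfl

-- ===== VERDICT (by name: the statement is the Claim_ definition above) =====
theorem perturbation_cone_spec : Claim_equal_perturbation_cone := by
  intro ic j rule T _ hpre
  unfold Spec_perturbation_cone
  exact main_eq ic j rule T hpre
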